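-- pv_equiv track=rewrite | github.com/SassAndSweet/asifah-europe-backend | russia_stability.py | _score_vector_from_articles
-- ===== SOURCE A (Python) =====
-- def _score_vector_from_articles(articles, keyword_dict):
--     """Score articles against a keyword vector. Returns level 0-5."""
--     max_level = 0
--     for art in articles:
--         title = (art.get('title') or art.get('name') or '').lower()
--         desc  = (art.get('description') or art.get('url') or '').lower()
--         text  = f"{title} {desc}"
--         for level in sorted(keyword_dict.keys(), reverse=True):
--             for kw in keyword_dict[level]:
--                 if kw.lower() in text:
--                     max_level = max(max_level, level)
--                     break
--     return max_level
-- ===== SOURCE B (Python) =====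
-- def _score_vector_from_articles(articles, keyword_dict):
--     """Score articles against a keyword vector. Returns level 0-5."""
--     for level in sorted(keyword_dict, reverse=True):
--         if level <= 0:
--             break  # the default score is 0; lower levels cannot raise it
--         kws = keyword_dict[level]
--         for art in articles:
--             title = (art.get('title') or art.get('name') or '').lower()
--             desc = (art.get('description') or art.get('url') or '').lower()
--             text = f"{title} {desc}"
--             if any(kw.lower() in text for kw in kws):
--                 return level
--     return 0
-- ===== Notes on version B (the rewrite author's own statement) =====
-- stated objective: alternative
-- what changed: Loops are inverted: B iterates levels in descending order as the outer loop (stopping once levels reach the default score 0, which cannot be raised by lower levels) and returns immediately at the first level any article matches, removing A's max_level accumulator and per-article descending scan.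
import Mathlib
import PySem

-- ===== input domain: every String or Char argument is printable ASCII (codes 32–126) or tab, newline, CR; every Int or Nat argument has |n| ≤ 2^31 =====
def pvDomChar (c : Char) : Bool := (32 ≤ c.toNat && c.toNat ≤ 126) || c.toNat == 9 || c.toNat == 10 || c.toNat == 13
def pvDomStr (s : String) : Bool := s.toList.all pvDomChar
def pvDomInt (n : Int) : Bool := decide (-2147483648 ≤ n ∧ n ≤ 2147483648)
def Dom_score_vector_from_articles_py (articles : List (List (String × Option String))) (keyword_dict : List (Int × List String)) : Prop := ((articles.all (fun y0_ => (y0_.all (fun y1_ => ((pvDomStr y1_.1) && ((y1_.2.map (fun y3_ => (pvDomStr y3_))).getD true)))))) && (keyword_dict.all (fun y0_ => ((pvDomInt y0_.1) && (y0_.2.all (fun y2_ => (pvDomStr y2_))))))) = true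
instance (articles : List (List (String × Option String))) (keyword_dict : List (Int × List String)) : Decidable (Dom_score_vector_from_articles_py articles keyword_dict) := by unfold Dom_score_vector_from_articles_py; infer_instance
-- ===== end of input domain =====

-- B inverts the loop nesting: descending levels outermost, stopping at levels ≤ 0, with a global early return; same text construction, same result.


-- shared text construction ('x or y or ""' then .lower(), title and desc joined by a space), used verbatim by both Pythons
def pvOrVal (v : Option (Option String)) (fallback : String) : String :=
  match v with
  | some (some s) => if s = "" then fallback else s
  | _ => fallback

def pvText (art : List (String × Option String)) : List Char :=
  let d := PySem.Dict.ofList art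
  let title := PySem.Chars.lower (pvOrVal (d.get? "title") (pvOrVal (d.get? "name") "")).toList
  let desc := PySem.Chars.lower (pvOrVal (d.get? "description") (pvOrVal (d.get? "url") "")).toList
  title ++ ' ' :: desc

def pvHit (art : List (String × Option String)) (kw : String) : Bool :=
  PySem.Chars.isIn (PySem.Chars.lower kw.toList) (pvText art)

-- ===== PORT A =====
-- inner 'for kw … break' loop: first matching keyword updates max_level and stops
def pvAKws (acc level : Int) (kws : List String) (art : List (String × Option String)) : Int :=
  match kws with
  | [] => acc
  | kw :: rest => if pvHit art kw then max acc level else pvAKws acc level rest art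

def score_vector_from_articles_py (articles : List (List (String × Option String))) (keyword_dict : List (Int × List String)) : Int :=
  let d := PySem.Dict.ofList keyword_dict
  let levels := PySem.List.sorted d.keys (fun x => x) true
  articles.foldl (fun acc art => levels.foldl (fun acc level => pvAKws acc level (d.getD level []) art) acc) 0

-- ===== PORT B =====
-- outer loop over descending levels, stopping once levels reach 0 ('break'); first level matched by any article is returned
def pvBLoop (articles : List (List (String × Option String))) (d : PySem.Dict Int (List String)) : List Int → Int
  | [] => 0
  | level :: rest =>
      if level ≤ 0 then 0
      else if articles.any (fun art => (d.getD level []).any (fun kw => pvHit art kw)) then level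
      else pvBLoop articles d rest

def score_vector_from_articles_py_alt (articles : List (List (String × Option String))) (keyword_dict : List (Int × List String)) : Int :=
  let d := PySem.Dict.ofList keyword_dict
  pvBLoop articles d (PySem.List.sorted d.keys (fun x => x) true)

-- ===== PRECONDITION & SPEC =====
def Spec_score_vector_from_articles_py (articles : List (List (String × Option String))) (keyword_dict : List (Int × List String)) (out : Int) : Prop := out = score_vector_from_articles_py_alt articles keyword_dict
instance (articles : List (List (String × Option String))) (keyword_dict : List (Int × List String)) (out : Int) : Decidable (Spec_score_vector_from_articles_py articles keyword_dict out) := by unfold Spec_score_vector_from_articles_py; infer_instance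

-- ===== CLAIM (what is proved, stated in full; the proofs are below) =====
def Claim_equal_score_vector_from_articles_py : Prop := ∀ (articles : List (List (String × Option String))) (keyword_dict : List (Int × List String)), Dom_score_vector_from_articles_py articles keyword_dict → Spec_score_vector_from_articles_py articles keyword_dict (score_vector_from_articles_py articles keyword_dict)

-- ===== LEMMAS AND PROOFS =====

-- A's inner keyword loop is a conditional max over 'some keyword hits'
theorem pvAKws_eq (acc level : Int) (kws : List String) (art : List (String × Option String)) :
    pvAKws acc level kws art = if kws.any (fun kw => pvHit art kw) then max acc level else acc := by
  induction kws with
  | nil => simp [pvAKws]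
  | cons kw rest ih =>
      simp only [pvAKws, List.any_cons, ih]
      by_cases h : pvHit art kw = true <;> simp [h]

-- fold of conditional max = fold of max over the filtered list
theorem pvFoldIf (c : Int → Bool) (L : List Int) : ∀ acc : Int,
    L.foldl (fun a l => if c l then max a l else a) acc = (L.filter c).foldl max acc := by
  induction L with
  | nil => intro acc; rfl
  | cons l rest ih =>
      intro acc
      by_cases h : c l = true <;> simp [List.foldl_cons, h, ih]

theorem pvLeFoldlMax (acc : Int) (xs : List Int) : acc ≤ xs.foldl max acc := by
  induction xs generalizing acc with
  | nil => exact le_refl acc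
  | cons x rest ih => exact le_trans (le_max_left acc x) (ih (max acc x))

theorem pvMemLeFoldlMax (xs : List Int) : ∀ (acc x : Int), x ∈ xs → x ≤ xs.foldl max acc := by
  induction xs with
  | nil => intro _ _ h; cases h
  | cons y rest ih =>
      intro acc x h
      rcases List.mem_cons.mp h with h | h
      · subst h; exact le_trans (le_max_right acc x) (pvLeFoldlMax _ rest)
      · exact ih _ x h

theorem pvFoldlMaxLe (xs : List Int) : ∀ (acc c : Int), acc ≤ c → (∀ x ∈ xs, x ≤ c) → xs.foldl max acc ≤ c := by
  induction xs with
  | nil => intro acc c h _; exact h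
  | cons y rest ih =>
      intro acc c h hall
      exact ih _ c (max_le h (hall y (List.mem_cons_self))) (fun x hx => hall x (List.mem_cons_of_mem _ hx))

-- a max-fold only depends on which elements occur
theorem pvFoldlMaxCongr (xs ys : List Int) (acc : Int) (h : ∀ x, x ∈ xs ↔ x ∈ ys) :
    xs.foldl max acc = ys.foldl max acc := by
  apply le_antisymm
  · exact pvFoldlMaxLe xs acc _ (pvLeFoldlMax acc ys) (fun x hx => pvMemLeFoldlMax ys acc x ((h x).mp hx))
  · exact pvFoldlMaxLe ys acc _ (pvLeFoldlMax acc xs) (fun x hx => pvMemLeFoldlMax xs acc x ((h x).mpr hx))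

theorem pvFoldlMaxOfLe (xs : List Int) (acc : Int) (h : ∀ x ∈ xs, x ≤ acc) : xs.foldl max acc = acc :=
  le_antisymm (pvFoldlMaxLe xs acc acc (le_refl acc) h) (pvLeFoldlMax acc xs)

-- A's double fold equals a single filtered max-fold over levels, with 'matched by some article'
theorem pvA_eq_filter (articles : List (List (String × Option String))) (d : PySem.Dict Int (List String))
    (L : List Int) :
    articles.foldl (fun acc art => L.foldl (fun acc level => pvAKws acc level (d.getD level []) art) acc) 0
      = (L.filter (fun l => articles.any (fun art => (d.getD l []).any (fun kw => pvHit art kw)))).foldl max 0 := by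
  have hstep : ∀ (art : List (String × Option String)) (acc : Int),
      L.foldl (fun acc level => pvAKws acc level (d.getD level []) art) acc
        = (L.filter (fun l => (d.getD l []).any (fun kw => pvHit art kw))).foldl max acc := by
    intro art acc
    have := pvFoldIf (fun l => (d.getD l []).any (fun kw => pvHit art kw)) L acc
    simpa [pvAKws_eq] using this
  have hflat : ∀ acc : Int,
      articles.foldl (fun acc art => L.foldl (fun acc level => pvAKws acc level (d.getD level []) art) acc) acc
        = (articles.flatMap (fun art => L.filter (fun l => (d.getD l []).any (fun kw => pvHit art kw)))).foldl max acc := by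
    induction articles with
    | nil => intro acc; rfl
    | cons a rest ih =>
        intro acc
        simp only [List.foldl_cons, List.flatMap_cons, List.foldl_append, hstep a acc, ih]
  calc articles.foldl (fun acc art => L.foldl (fun acc level => pvAKws acc level (d.getD level []) art) acc) 0
      = (articles.flatMap (fun art => L.filter (fun l => (d.getD l []).any (fun kw => pvHit art kw)))).foldl max 0 := hflat 0
    _ = (L.filter (fun l => articles.any (fun art => (d.getD l []).any (fun kw => pvHit art kw)))).foldl max 0 := by
        apply pvFoldlMaxCongr
        intro x
        simp only [List.mem_flatMap, List.mem_filter, List.any_eq_true]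
        constructor
        · rintro ⟨art, ha, hx, hm⟩; exact ⟨hx, art, ha, hm⟩
        · rintro ⟨hx, art, ha, hm⟩; exact ⟨art, ha, hx, hm⟩

-- B's early-return scan over a descending list equals the filtered max-fold
theorem pvB_eq_filter (articles : List (List (String × Option String))) (d : PySem.Dict Int (List String))
    (L : List Int) (hL : L.Pairwise (fun a b => b ≤ a)) :
    pvBLoop articles d L
      = (L.filter (fun l => articles.any (fun art => (d.getD l []).any (fun kw => pvHit art kw)))).foldl max 0 := by
  induction L with
  | nil => rfl
  | cons l rest ih =>
      rcases List.pairwise_cons.mp hL with ⟨hle, htail⟩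
      by_cases hneg : l ≤ 0
      · simp only [pvBLoop, hneg, if_pos]
        symm
        apply pvFoldlMaxOfLe
        intro x hx
        rcases List.mem_cons.mp (List.mem_of_mem_filter hx) with h | h
        · exact h ▸ hneg
        · exact le_trans (hle x h) hneg
      · by_cases h : articles.any (fun art => (d.getD l []).any (fun kw => pvHit art kw)) = true
        · simp only [pvBLoop, hneg, h, if_pos, List.filter_cons, List.foldl_cons]
          rw [pvFoldlMaxOfLe]
          · simp [max_eq_right (show (0:Int) ≤ l by omega)]
          · intro x hx
            exact le_trans (hle x (List.mem_of_mem_filter hx)) (le_max_right 0 l)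
        · simp only [pvBLoop, hneg, List.filter_cons]
          simpa [h] using ih htail

-- ===== VERDICT (by name: the statement is the Claim_ definition above) =====
theorem score_vector_from_articles_py_spec : Claim_equal_score_vector_from_articles_py := by
  intro articles keyword_dict _
  unfold Spec_score_vector_from_articles_py score_vector_from_articles_py score_vector_from_articles_py_alt
  rw [pvA_eq_filter, pvB_eq_filter]
  exact PySem.List.sorted_pairwise_rev _ _
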